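-- pv_equiv track=rewrite | github.com/WojtowiczZuzanna/pp1 | 04-Subroutines/04_44.py | f
-- ===== SOURCE A (Python) =====
-- def f(password):
--     if len(password) < 6:
--         return False
--
--     different = ""
--     for char in password:
--         if password.count(char) == 1:
--             different += char
--
--
--     if len(different) >= 6:
--         return True
--     else:
--         return False
-- ===== SOURCE B (Python) =====
-- def f(password):
--     if len(password) < 6:
--         return False
--     s = sorted(password)
--     singles = 0
--     i = 0
--     while i < len(s):
--         j = i + 1
--         while j < len(s) and s[j] == s[i]:
--             j += 1
--         if j - i == 1:
--             singles += 1
--         i = j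
--     return singles >= 6
-- ===== Notes on version B (the rewrite author's own statement) =====
-- stated objective: faster
-- what changed: Instead of scanning the whole password with .count for every character (quadratic), B sorts the password once and makes a single adjacent-run (groupby-style) scan over the sorted characters, counting runs of length 1.
import Mathlib
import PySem

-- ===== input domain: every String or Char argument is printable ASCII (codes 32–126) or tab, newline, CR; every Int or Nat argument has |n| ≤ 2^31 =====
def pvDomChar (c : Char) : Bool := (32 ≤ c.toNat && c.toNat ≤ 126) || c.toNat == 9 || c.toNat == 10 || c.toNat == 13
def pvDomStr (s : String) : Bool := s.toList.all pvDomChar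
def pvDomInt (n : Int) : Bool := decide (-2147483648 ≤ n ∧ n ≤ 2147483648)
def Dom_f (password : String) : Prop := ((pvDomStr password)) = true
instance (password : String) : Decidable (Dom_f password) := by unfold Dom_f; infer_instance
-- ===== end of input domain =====

-- B sorts the password once and counts runs of length 1 in a single adjacent-run scan,
-- replacing A's per-character password.count scans; equal return value proved below.

-- ===== PORT A =====
def f (password : String) : Bool :=
  if PySem.Str.len password < 6 then false
  else
    -- different = ""; for char in password: if password.count(char) == 1: different += char
    let different := password.toList.foldl
      (fun acc ch => if PySem.Str.count password (String.ofList [ch]) == 1 then acc ++ [ch] else acc)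
      ([] : List Char)
    if different.length ≥ 6 then true else false

-- ===== PORT B =====
-- the outer while loop of Source B: consume one run of equal characters per step
-- (the inner 'while s[j] == s[i]: j += 1' advance is the takeWhile/dropWhile split),
-- adding 1 to singles when the run has length 1
def scanRuns : List Char → Int
  | [] => 0
  | c :: rest =>
      (if rest.takeWhile (fun x => x == c) = [] then 1 else 0)
        + scanRuns (rest.dropWhile (fun x => x == c))
termination_by l => l.length
decreasing_by
  simp only [List.length_cons]
  exact Nat.lt_succ_of_le (List.length_dropWhile_le _ _)

def f_alt (password : String) : Bool :=
  if PySem.Str.len password < 6 then false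
  else
    let s := PySem.List.sorted password.toList (fun c => c) false
    decide (6 ≤ scanRuns s)

-- ===== PRECONDITION & SPEC =====
def Spec_f (password : String) (out : Bool) : Prop := out = f_alt password
instance (password : String) (out : Bool) : Decidable (Spec_f password out) := by unfold Spec_f; infer_instance

-- ===== CLAIM (what is proved, stated in full; the proofs are below) =====
def Claim_equal_f : Prop := ∀ (password : String), Dom_f password → Spec_f password (f password)

-- ===== LEMMAS AND PROOFS =====

-- str.count with a one-character needle is the character count
theorem chars_count_go_singleton (c : Char) (cs : List Char) : ∀ (fuel acc : Nat), cs.length ≤ fuel →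
    PySem.Chars.count.go [c] fuel cs acc = acc + List.count c cs := by
  induction cs with
  | nil => intro fuel acc _; cases fuel <;> simp [PySem.Chars.count.go]
  | cons h t ih =>
    intro fuel acc hf
    cases fuel with
    | zero => simp at hf
    | succ n =>
      have hn : t.length ≤ n := by simpa using hf
      rw [PySem.Chars.count.go]
      by_cases hc : c = h
      · subst hc
        simp [List.isPrefixOf, ih n (acc + 1) hn]
        omega
      · have : (c == h) = false := by simp [hc]
        simp [List.isPrefixOf, this, ih n acc hn, Ne.symm hc]

theorem str_count_singleton (s : String) (c : Char) :
    PySem.Str.count s (String.ofList [c]) = List.count c s.toList := by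
  rw [PySem.Str.count_eq]
  have h1 : (String.ofList [c]).toList = [c] := by simp
  rw [h1]
  simp only [PySem.Chars.count]
  simp only [List.isEmpty_cons, Bool.false_eq_true, if_false]
  have h2 := chars_count_go_singleton c s.toList s.toList.length 0 le_rfl
  simpa using h2

-- on a sorted list, the number of length-1 runs equals the number of positions whose
-- character occurs exactly once (each once-occurring character is its own run)
theorem scanRuns_sorted (l : List Char) :
    l.Pairwise (· ≤ ·) → scanRuns l = (l.countP (fun k => List.count k l == 1) : Int) := by
  induction l using scanRuns.induct with
  | case1 => intro _; simp [scanRuns]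
  | case2 c rest ih =>
    intro hs
    set run := rest.takeWhile (fun x => x == c) with hrun
    set rest' := rest.dropWhile (fun x => x == c) with hrest'
    have hsplit : rest = run ++ rest' := (List.takeWhile_append_dropWhile).symm
    have hruneq : ∀ x ∈ run, x = c := by
      intro x hx
      have := List.mem_takeWhile_imp hx
      simpa using this
    -- c does not occur in rest'
    have hc_not : c ∉ rest' := by
      intro hmem
      rcases hrest'' : rest' with _ | ⟨h0, t0⟩
      · simp [hrest''] at hmem
      · have hhead : ¬ (h0 == c) = true := by
          have := List.head?_dropWhile_not (p := fun x => x == c) (l := rest)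
          rw [← hrest', hrest''] at this
          simpa using this
        have hne : h0 ≠ c := by simpa using hhead
        rw [hrest''] at hmem
        rcases List.mem_cons.mp hmem with h | h
        · exact hne h.symm
        · have hc_le : c ≤ h0 := by
            have := (List.pairwise_cons.mp hs).1
            apply this
            rw [hsplit, hrest'']; simp
          have hsub : (h0 :: t0).Sublist (c :: rest) := by
            rw [hsplit, hrest'']
            exact (List.sublist_append_right _ _).cons _
          have hpw' : (h0 :: t0).Pairwise (· ≤ ·) := hs.sublist hsub
          have h0_le : h0 ≤ c := (List.pairwise_cons.mp hpw').1 c h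
          exact hne (le_antisymm h0_le hc_le)
    have hpw_rest' : rest'.Pairwise (· ≤ ·) := by
      have hsub : rest'.Sublist (c :: rest) := by
        rw [hsplit]; exact (List.sublist_append_right _ _).cons _
      exact hs.sublist hsub
    have hcount_c : List.count c (c :: rest) = run.length + 1 := by
      rw [hsplit, List.count_cons_self, List.count_append,
        List.count_eq_zero_of_not_mem hc_not]
      have : List.count c run = run.length := by
        rw [List.count_eq_length]
        intro x hx; exact ((hruneq x hx).symm : c = x) ▸ rfl
      omega
    have hcount_ne : ∀ k, k ≠ c → List.count k (c :: rest) = List.count k rest' := by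
      intro k hk
      have h0 : List.count k run = 0 := by
        rw [List.count_eq_zero]
        intro hmem; exact hk (hruneq k hmem)
      rw [hsplit]
      simp only [List.count_cons, List.count_append, h0, beq_iff_eq]
      rw [if_neg (Ne.symm hk)]
      omega
    -- abstract the predicate so that rewriting rest = run ++ rest' leaves it alone
    obtain ⟨P, hPdef⟩ : ∃ P, P = fun k => (List.count k (c :: rest) == 1) := ⟨_, rfl⟩
    have hPc : P c = true ↔ run = [] := by
      rw [hPdef]; simp only [hcount_c, beq_iff_eq]
      constructor
      · intro h; exact List.eq_nil_of_length_eq_zero (by omega)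
      · intro h; simp [h]
    have hPrun : run.countP P = 0 := by
      rw [List.countP_eq_zero]
      intro x hx
      have hxc := hruneq x hx; subst hxc
      rw [hPdef]; simp only [hcount_c, beq_iff_eq]
      intro habs
      have : run ≠ [] := fun h => by rw [h] at hx; exact (List.not_mem_nil hx)
      have : 0 < run.length := List.length_pos_iff.mpr this
      omega
    have hPrest' : rest'.countP P = rest'.countP (fun k => List.count k rest' == 1) := by
      apply List.countP_congr
      intro k hk
      have hkc : k ≠ c := fun h => hc_not (h ▸ hk)
      rw [hPdef]; simp only [hcount_ne k hkc]
    have hcountP : (c :: rest).countP P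
        = (if run = [] then 1 else 0) + rest'.countP (fun k => List.count k rest' == 1) := by
      conv_lhs => rw [hsplit]
      rw [List.countP_cons, List.countP_append, hPrun, hPrest']
      by_cases hnil : run = []
      · rw [if_pos hnil, if_pos (hPc.mpr hnil)]; omega
      · rw [if_neg hnil, if_neg (fun h => hnil (hPc.mp h))]; omega
    rw [scanRuns, ih hpw_rest', ← hPdef, hcountP, Int.natCast_add]
    split_ifs <;> simp

theorem f_eq_f_alt (password : String) : f password = f_alt password := by
  unfold f f_alt
  by_cases hlen : PySem.Str.len password < 6
  · rw [if_pos hlen, if_pos hlen]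
  · rw [if_neg hlen, if_neg hlen]
    set l := password.toList with hl
    -- A side: the accumulated string is the filter of once-occurring characters
    have hp : (fun ch => (PySem.Str.count password (String.ofList [ch]) == 1)) =
        (fun ch => (List.count ch l == 1)) := by
      funext ch; rw [str_count_singleton]
    rw [PySem.List.foldl_append_if_eq_filter
      (fun ch => PySem.Str.count password (String.ofList [ch]) == 1) l [], hp]
    -- B side: the run scan over the sorted list counts the same characters
    have hperm : (PySem.List.sorted l (fun c => c) false).Perm l := PySem.List.sorted_perm _ _ _
    have hpw : (PySem.List.sorted l (fun c => c) false).Pairwise (· ≤ ·) := by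
      have := PySem.List.sorted_pairwise (xs := l) (key := fun c => c)
      simpa using this
    have hB : scanRuns (PySem.List.sorted l (fun c => c) false)
        = (l.countP (fun k => List.count k l == 1) : Int) := by
      rw [scanRuns_sorted _ hpw]
      congr 1
      calc (PySem.List.sorted l (fun c => c) false).countP
              (fun k => List.count k (PySem.List.sorted l (fun c => c) false) == 1)
          = (PySem.List.sorted l (fun c => c) false).countP (fun k => List.count k l == 1) := by
            apply List.countP_congr
            intro k _
            rw [hperm.count_eq]
        _ = l.countP (fun k => List.count k l == 1) := hperm.countP_eq _
    show (if (([] : List Char) ++ List.filter (fun ch => List.count ch l == 1) l).length ≥ 6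
            then true else false)
        = decide (6 ≤ scanRuns (PySem.List.sorted l (fun c => c) false))
    rw [hB]
    simp only [List.nil_append, ← List.countP_eq_length_filter]
    by_cases h6 : 6 ≤ l.countP (fun k => List.count k l == 1)
    · rw [if_pos h6]
      exact (decide_eq_true (by exact_mod_cast h6)).symm
    · rw [if_neg h6]
      symm; rw [decide_eq_false_iff_not]
      intro habs; exact h6 (by exact_mod_cast habs)

-- ===== VERDICT (by name: the statement is the Claim_ definition above) =====
theorem f_spec : Claim_equal_f := by
  intro password _
  unfold Spec_f
  exact f_eq_f_alt password
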